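-- pv_equiv track=rewrite | github.com/davidcantidio/npbb | backend/scripts/run_critical_explains.py | detect_explain_flags
-- ===== SOURCE A (Python) =====
-- def detect_explain_flags(plan_lines: list[str]) -> tuple[str, ...]:
--     flags: set[str] = set()
--     lowered = [line.lower() for line in plan_lines]
--     if any("seq scan" in line for line in lowered):
--         flags.add("seq_scan")
--     if any("temp blocks" in line or "temp read=" in line or "temp written=" in line for line in lowered):
--         flags.add("temp_blocks")
--     if any("sort method: external merge" in line or "disk:" in line for line in lowered):
--         flags.add("sort_spill")
--
--     shared_reads = 0
--     for line in lowered: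
--         if "buffers:" not in line or "read=" not in line:
--             continue
--         try:
--             read_chunk = line.split("read=", 1)[1].split()[0]
--             shared_reads += int(read_chunk.rstrip(","))
--         except (IndexError, ValueError):
--             continue
--     if shared_reads >= 1000:
--         flags.add("heavy_buffer_read")
--     return tuple(sorted(flags))
-- ===== SOURCE B (Python) =====
-- def detect_explain_flags(plan_lines: list[str]) -> tuple[str, ...]:
--     seq = temp = spill = False
--     reads = 0
--     for line in plan_lines:
--         low = line.lower()
--         if "seq scan" in low:
--             seq = True
--         if "temp blocks" in low or "temp read=" in low or "temp written=" in low: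
--             temp = True
--         if "sort method: external merge" in low or "disk:" in low:
--             spill = True
--         if "buffers:" in low and "read=" in low:
--             words = low.split("read=", 1)[1].split()
--             if words:
--                 try:
--                     reads += int(words[0].rstrip(","))
--                 except ValueError:
--                     pass
--     out = []
--     if reads >= 1000:
--         out.append("heavy_buffer_read")
--     if seq:
--         out.append("seq_scan")
--     if spill:
--         out.append("sort_spill")
--     if temp:
--         out.append("temp_blocks")
--     return tuple(out)
-- ===== Notes on version B (the rewrite author's own statement) =====
-- stated objective: alternative
-- what changed: B replaces A's set-plus-sort over four separate scans of a lowered copy with one pass that lowers each line once, tracks three booleans and the read counter together, and emits the flags directly in alphabetical order without building or sorting a set.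
import Mathlib
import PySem

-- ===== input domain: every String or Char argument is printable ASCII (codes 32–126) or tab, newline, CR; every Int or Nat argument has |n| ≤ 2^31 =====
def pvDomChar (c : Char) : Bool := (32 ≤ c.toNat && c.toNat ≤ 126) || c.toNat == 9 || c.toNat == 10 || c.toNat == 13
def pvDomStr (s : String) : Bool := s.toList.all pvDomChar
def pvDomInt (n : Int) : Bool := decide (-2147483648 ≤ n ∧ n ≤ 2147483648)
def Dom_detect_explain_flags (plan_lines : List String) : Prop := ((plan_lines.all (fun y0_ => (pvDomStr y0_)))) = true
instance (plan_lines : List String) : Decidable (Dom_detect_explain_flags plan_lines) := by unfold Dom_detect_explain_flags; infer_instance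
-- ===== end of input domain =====

-- B folds once over the lines (lowering each line once, tracking three booleans and the read
-- counter together) and emits the flags directly in alphabetical order, instead of A's four
-- separate scans of a lowered copy plus a set that is sorted at the end. Objective: alternative.

-- ===== PORT A =====
-- s.rstrip(",") ported by hand (PySem has no right-strip-with-chars): drop trailing ','
-- characters from the end; exact for this single-character strip set.
def pvRstripComma (s : String) : String :=
  String.ofList ((s.toList.reverse.dropWhile (fun c => c == ',')).reverse)

def detect_explain_flags (plan_lines : List String) : List String :=
  let flags : PySem.Set String := PySem.Set.empty
  let lowered := plan_lines.map PySem.Str.lower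
  let flags := if lowered.any (fun line => PySem.Str.isIn "seq scan" line) then flags.add "seq_scan" else flags
  let flags := if lowered.any (fun line => PySem.Str.isIn "temp blocks" line || PySem.Str.isIn "temp read=" line || PySem.Str.isIn "temp written=" line) then flags.add "temp_blocks" else flags
  let flags := if lowered.any (fun line => PySem.Str.isIn "sort method: external merge" line || PySem.Str.isIn "disk:" line) then flags.add "sort_spill" else flags
  let shared_reads : Int := lowered.foldl (fun acc line =>
    if !(PySem.Str.isIn "buffers:" line) || !(PySem.Str.isIn "read=" line) then acc
    else
      match ((PySem.Str.splitMax? line "read=" 1).getD [])[1]? with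
      | none => acc      -- IndexError caught: continue
      | some after =>
        match (PySem.Str.split₀ after)[0]? with
        | none => acc    -- IndexError caught: continue
        | some chunk =>
          match PySem.Int.ofStr? (pvRstripComma chunk) with
          | none => acc  -- ValueError caught: continue
          | some n => acc + n) 0
  let flags := if shared_reads ≥ 1000 then flags.add "heavy_buffer_read" else flags
  PySem.List.sorted flags (fun x => x) false

-- ===== PORT B =====
-- loop state: (seq, temp, spill, reads)
def pvStepB (st : Bool × Bool × Bool × Int) (line : String) : Bool × Bool × Bool × Int :=
  let low := PySem.Str.lower line
  let seq := if PySem.Str.isIn "seq scan" low then true else st.1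
  let temp := if PySem.Str.isIn "temp blocks" low || PySem.Str.isIn "temp read=" low || PySem.Str.isIn "temp written=" low then true else st.2.1
  let spill := if PySem.Str.isIn "sort method: external merge" low || PySem.Str.isIn "disk:" low then true else st.2.2.1
  let reads :=
    if PySem.Str.isIn "buffers:" low && PySem.Str.isIn "read=" low then
      -- low.split("read=", 1)[1]: the index is in range because "read=" occurs in low
      match PySem.Str.split₀ (((PySem.Str.splitMax? low "read=" 1).getD [])[1]?.getD "") with
      | [] => st.2.2.2
      | w :: _ =>
        match PySem.Int.ofStr? (pvRstripComma w) with
        | none => st.2.2.2   -- ValueError: pass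
        | some n => st.2.2.2 + n
    else st.2.2.2
  (seq, temp, spill, reads)

def detect_explain_flags_alt (plan_lines : List String) : List String :=
  let st := plan_lines.foldl pvStepB (false, false, false, (0 : Int))
  let out : List String := []
  let out := if st.2.2.2 ≥ 1000 then out ++ ["heavy_buffer_read"] else out
  let out := if st.1 then out ++ ["seq_scan"] else out
  let out := if st.2.2.1 then out ++ ["sort_spill"] else out
  let out := if st.2.1 then out ++ ["temp_blocks"] else out
  out

-- ===== PRECONDITION & SPEC =====
def Spec_detect_explain_flags (plan_lines : List String) (out : List String) : Prop := out = detect_explain_flags_alt plan_lines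
instance (plan_lines : List String) (out : List String) : Decidable (Spec_detect_explain_flags plan_lines out) := by unfold Spec_detect_explain_flags; infer_instance

-- ===== CLAIM (what is proved, stated in full; the proofs are below) =====
def Claim_equal_detect_explain_flags : Prop := ∀ (plan_lines : List String), Dom_detect_explain_flags plan_lines → Spec_detect_explain_flags plan_lines (detect_explain_flags plan_lines)

-- ===== LEMMAS AND PROOFS =====

-- A's per-line reads update (on the already-lowered line), named for the proof
def pvStepA (acc : Int) (line : String) : Int :=
  if !(PySem.Str.isIn "buffers:" line) || !(PySem.Str.isIn "read=" line) then acc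
  else
    match ((PySem.Str.splitMax? line "read=" 1).getD [])[1]? with
    | none => acc
    | some after =>
      match (PySem.Str.split₀ after)[0]? with
      | none => acc
      | some chunk =>
        match PySem.Int.ofStr? (pvRstripComma chunk) with
        | none => acc
        | some n => acc + n

lemma stepB_reads (low : String) (acc : Int) :
    (if PySem.Str.isIn "buffers:" low && PySem.Str.isIn "read=" low then
      match PySem.Str.split₀ (((PySem.Str.splitMax? low "read=" 1).getD [])[1]?.getD "") with
      | [] => acc
      | w :: _ =>
        match PySem.Int.ofStr? (pvRstripComma w) with
        | none => acc
        | some n => acc + n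
     else acc) = pvStepA acc low := by
  unfold pvStepA
  cases hb : PySem.Str.isIn "buffers:" low <;> cases hr : PySem.Str.isIn "read=" low <;> simp
  cases h1 : ((PySem.Str.splitMax? low "read=" 1).getD [])[1]? with
  | none =>
    simp only [Option.getD_none]
    rw [show PySem.Str.split₀ "" = [] from by decide]
  | some after =>
    simp [h1]
    cases PySem.Str.split₀ after with
    | nil => simp
    | cons w ws => cases PySem.Int.ofStr? (pvRstripComma w) <;> simp

lemma if_true_else (c b : Bool) : (if c = true then true else b) = (b || c) := by
  cases c <;> simp

lemma stepB_eq (st : Bool × Bool × Bool × Int) (x : String) :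
    pvStepB st x =
      (st.1 || PySem.Str.isIn "seq scan" (PySem.Str.lower x),
       st.2.1 || (PySem.Str.isIn "temp blocks" (PySem.Str.lower x) || PySem.Str.isIn "temp read=" (PySem.Str.lower x) || PySem.Str.isIn "temp written=" (PySem.Str.lower x)),
       st.2.2.1 || (PySem.Str.isIn "sort method: external merge" (PySem.Str.lower x) || PySem.Str.isIn "disk:" (PySem.Str.lower x)),
       pvStepA st.2.2.2 (PySem.Str.lower x)) := by
  unfold pvStepB
  simp only [if_true_else, stepB_reads]

lemma foldB (lines : List String) (s t p : Bool) (r : Int) :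
    lines.foldl pvStepB (s, t, p, r) =
      (s || lines.any (fun l => PySem.Str.isIn "seq scan" (PySem.Str.lower l)),
       t || lines.any (fun l => PySem.Str.isIn "temp blocks" (PySem.Str.lower l) || PySem.Str.isIn "temp read=" (PySem.Str.lower l) || PySem.Str.isIn "temp written=" (PySem.Str.lower l)),
       p || lines.any (fun l => PySem.Str.isIn "sort method: external merge" (PySem.Str.lower l) || PySem.Str.isIn "disk:" (PySem.Str.lower l)),
       lines.foldl (fun acc l => pvStepA acc (PySem.Str.lower l)) r) := by
  induction lines generalizing s t p r with
  | nil => simp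
  | cons x xs ih =>
    simp only [List.foldl_cons, List.any_cons, stepB_eq, ih, Bool.or_assoc]

-- ===== VERDICT (by name: the statement is the Claim_ definition above) =====
lemma assemble (b1 b2 b3 : Bool) (r : Int) :
    (let flags : PySem.Set String := PySem.Set.empty
     let flags := if b1 then flags.add "seq_scan" else flags
     let flags := if b2 then flags.add "temp_blocks" else flags
     let flags := if b3 then flags.add "sort_spill" else flags
     let flags := if r ≥ 1000 then flags.add "heavy_buffer_read" else flags
     PySem.List.sorted flags (fun x => x) false) =
    (let out : List String := []
     let out := if r ≥ 1000 then out ++ ["heavy_buffer_read"] else out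
     let out := if b1 then out ++ ["seq_scan"] else out
     let out := if b3 then out ++ ["sort_spill"] else out
     let out := if b2 then out ++ ["temp_blocks"] else out
     out) := by
  cases b1 <;> cases b2 <;> cases b3 <;> by_cases hr : r ≥ 1000 <;>
    simp only [hr, Bool.false_eq_true, reduceIte, if_true, if_false] <;>
    (apply PySem.List.sorted_eq_of_perm_of_pairwise_lt <;>
      first
        | decide
        | (simp only [List.pairwise_cons, List.mem_cons, List.mem_singleton, List.not_mem_nil,
              String.lt_iff_toList_lt, List.Pairwise.nil, forall_eq, and_true, true_and] <;> decide))

theorem detect_explain_flags_spec : Claim_equal_detect_explain_flags := by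
  intro plan_lines _
  show detect_explain_flags plan_lines = detect_explain_flags_alt plan_lines
  unfold detect_explain_flags detect_explain_flags_alt
  simp only [foldB, List.any_map, List.foldl_map, Function.comp_def, pvStepA, Bool.false_or]
  exact assemble _ _ _ _
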